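-- pv_equiv track=rewrite | github.com/Yidne21/A2SV_Practice | A2svContest/contest6/coloring.py | max_possible_cost
-- ===== SOURCE A (Python) =====
-- def max_possible_cost(n, a):
--     a.sort()
--     colors = 1
--     max_cost = 0
--
--     for i in range(1, n):
--         gap = a[i] - a[i - 1]
--
--         if gap > 1:
--             colors += 1
--             max_cost += gap - 1
--
--     return max_cost
-- ===== SOURCE B (Python) =====
-- def max_possible_cost(n, a):
--     a.sort()
--     if n < 2:
--         return 0
--     return a[n - 1] - a[0] - len(set(a[:n])) + 1
-- ===== Notes on version B (the rewrite author's own statement) =====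
-- stated objective: simpler
-- what changed: Replaces the gap-summing loop over adjacent sorted elements with the closed form (a[n-1] - a[0]) - (number of distinct values among the first n sorted elements) + 1, keeping the in-place a.sort().
import Mathlib
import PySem

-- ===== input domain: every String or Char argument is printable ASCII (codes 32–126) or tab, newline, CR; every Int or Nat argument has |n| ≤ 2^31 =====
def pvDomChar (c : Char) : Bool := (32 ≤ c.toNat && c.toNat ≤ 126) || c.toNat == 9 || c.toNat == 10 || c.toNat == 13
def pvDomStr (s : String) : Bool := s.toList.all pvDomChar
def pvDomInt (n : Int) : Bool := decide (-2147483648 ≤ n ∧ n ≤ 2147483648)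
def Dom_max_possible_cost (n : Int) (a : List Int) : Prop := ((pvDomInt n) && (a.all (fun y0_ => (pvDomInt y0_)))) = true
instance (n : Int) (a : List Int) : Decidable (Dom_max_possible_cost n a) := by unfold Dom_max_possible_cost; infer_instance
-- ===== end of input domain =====

-- B replaces A's gap-summing loop by the closed form a[n-1] - a[0] - len(set(a[:n])) + 1 (simpler);
-- both A and B sort the argument list in place (same mutation); equivalence proved about the return value.

-- ===== PORT A =====
def max_possible_cost (n : Int) (a : List Int) : Int :=
  let s := PySem.List.sorted a (fun x => x) false
  let res := (PySem.List.pyRange 1 n 1).foldl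
    (fun (st : Int × Int) i =>
      let gap := PySem.List.pyGetD s i 0 - PySem.List.pyGetD s (i - 1) 0
      if gap > 1 then (st.1 + 1, st.2 + (gap - 1)) else st)
    (1, 0)
  res.2

-- ===== PORT B =====
def max_possible_cost_alt (n : Int) (a : List Int) : Int :=
  let s := PySem.List.sorted a (fun x => x) false
  if n < 2 then 0
  else
    PySem.List.pyGetD s (n - 1) 0 - PySem.List.pyGetD s 0 0
      - ((PySem.Set.ofList (PySem.List.slice s none (some n))).length : Int) + 1

-- ===== PRECONDITION & SPEC =====
-- Pre_ excludes exactly the inputs where A raises IndexError (n ≥ 2 with n > len(a)); B raises there too.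
def Pre_max_possible_cost (n : Int) (a : List Int) : Prop := n ≤ 1 ∨ n ≤ (a.length : Int)
instance (n : Int) (a : List Int) : Decidable (Pre_max_possible_cost n a) := by
  unfold Pre_max_possible_cost; infer_instance
def pvWitness_max_possible_cost : Int × List Int := (3, [5, 1, 4])

def Spec_max_possible_cost (n : Int) (a : List Int) (out : Int) : Prop := out = max_possible_cost_alt n a
instance (n : Int) (a : List Int) (out : Int) : Decidable (Spec_max_possible_cost n a out) := by
  unfold Spec_max_possible_cost; infer_instance

-- ===== CLAIM (what is proved, stated in full; the proofs are below) =====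
def Claim_equal_max_possible_cost : Prop := ∀ (n : Int) (a : List Int), Dom_max_possible_cost n a → Pre_max_possible_cost n a → Spec_max_possible_cost n a (max_possible_cost n a)

-- ===== LEMMAS AND PROOFS =====

-- the colors component of A's loop state does not influence the returned sum
theorem pv_snd_foldl (l : List Int) (g : Int → Int) (c acc : Int) :
    (l.foldl (fun (st : Int × Int) i =>
        if g i > 1 then (st.1 + 1, st.2 + (g i - 1)) else st) (c, acc)).2
      = l.foldl (fun acc i => if g i > 1 then acc + (g i - 1) else acc) acc := by
  induction l generalizing c acc with
  | nil => rfl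
  | cons x t ih =>
    simp only [List.foldl_cons]
    by_cases h : g x > 1 <;> simp [h, ih]

-- main loop characterisation on the sorted list
theorem pv_ofList_append_singleton (xs : List Int) (x : Int) :
    PySem.Set.ofList (xs ++ [x])
      = if x ∈ xs then PySem.Set.ofList xs else PySem.Set.ofList xs ++ [x] := by
  have h : PySem.Set.ofList (xs ++ [x]) = PySem.Set.add (PySem.Set.ofList xs) x := by
    simp [PySem.Set.ofList_eq_foldl, List.foldl_append]
  rw [h, PySem.Set.add]
  by_cases hx : x ∈ xs <;> simp [PySem.Set.contains, PySem.Set.mem_ofList, hx]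

theorem pv_mem_take_sorted (s : List Int) (hs : s.Pairwise (· ≤ ·)) (m : Nat)
    (h1 : 1 ≤ m) (h2 : m < s.length) :
    s[m] ∈ s.take m ↔ s[m] = s[m - 1]'(by omega) := by
  have hp := List.pairwise_iff_getElem.mp hs
  constructor
  · intro hmem
    obtain ⟨j, hj, hje⟩ := List.mem_iff_getElem.mp hmem
    have hjm : j < m := by simp [List.length_take] at hj; omega
    have hje' : s[j]'(by omega) = s[m] := by simpa [List.getElem_take] using hje
    have hA : s[j]'(by omega) ≤ s[m-1]'(by omega) := by
      rcases Nat.lt_or_ge j (m-1) with h | h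
      · exact hp j (m-1) (by omega) (by omega) h
      · have hje2 : j = m - 1 := by omega
        subst hje2; exact le_refl _
    have hB : s[m-1]'(by omega) ≤ s[m] := hp (m-1) m (by omega) h2 (by omega)
    omega
  · intro he
    rw [he]
    have hlt : m - 1 < (s.take m).length := by simp [List.length_take]; omega
    have heq : (s.take m)[m-1]'hlt = s[m-1]'(by omega) := by simp [List.getElem_take]
    exact heq ▸ List.getElem_mem hlt

theorem pv_loop_closed (s : List Int) (hs : s.Pairwise (· ≤ ·)) (m : Nat)
    (h1 : 1 ≤ m) (h2 : m ≤ s.length) :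
    (PySem.List.pyRange 1 (m : Int) 1).foldl
        (fun acc i => if (PySem.List.pyGetD s i 0 - PySem.List.pyGetD s (i - 1) 0) > 1
          then acc + ((PySem.List.pyGetD s i 0 - PySem.List.pyGetD s (i - 1) 0) - 1) else acc) 0
      = PySem.List.pyGetD s ((m : Int) - 1) 0 - PySem.List.pyGetD s 0 0
        - ((PySem.Set.ofList (s.take m)).length : Int) + 1 := by
  induction m, h1 using Nat.le_induction with
  | base =>
    obtain ⟨x, t, rfl⟩ := List.exists_cons_of_ne_nil (by intro h; subst h; simp at h2 :
      s ≠ [])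
    simp [PySem.List.pyRange_one_eq_nil, PySem.Set.ofList_eq_foldl, PySem.Set.add]
  | succ m hm ih =>
    have hmlt : m < s.length := by omega
    have hrange : PySem.List.pyRange 1 ((m+1 : Nat) : Int) 1
        = PySem.List.pyRange 1 (m : Int) 1 ++ [(m : Int)] := by
      push_cast
      exact PySem.List.pyRange_one_succ_right (by exact_mod_cast hm)
    rw [hrange, List.foldl_append, ih (by omega)]
    have hg1 : PySem.List.pyGetD s (m : Int) 0 = s[m] := by
      simp [PySem.List.pyGetD_natCast, List.getD_eq_getElem?_getD, List.getElem?_eq_getElem hmlt]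
    have hg2 : PySem.List.pyGetD s ((m : Int) - 1) 0 = s[m-1]'(by omega) := by
      have : (m : Int) - 1 = ((m - 1 : Nat) : Int) := by omega
      rw [this]
      simp [PySem.List.pyGetD_natCast, List.getD_eq_getElem?_getD,
        List.getElem?_eq_getElem (show m - 1 < s.length by omega)]
    have hg3 : ((m + 1 : Nat) : Int) - 1 = (m : Int) := by push_cast; ring
    have htake : s.take (m+1) = s.take m ++ [s[m]] := by
      rw [List.take_add_one, List.getElem?_eq_getElem hmlt]; rfl
    rw [hg3, htake, pv_ofList_append_singleton]
    have hmono : s[m-1]'(by omega) ≤ s[m] := by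
      exact List.pairwise_iff_getElem.mp hs (m-1) m (by omega) hmlt (by omega)
    simp only [List.foldl_cons, List.foldl_nil, hg1, hg2]
    by_cases hmem : s[m] ∈ List.take m s
    · have heq : s[m] = s[m-1]'(by omega) := (pv_mem_take_sorted s hs m hm hmlt).mp hmem
      rw [if_pos hmem, if_neg (by omega)]
      omega
    · have heq : s[m] ≠ s[m-1]'(by omega) := fun h =>
        hmem ((pv_mem_take_sorted s hs m hm hmlt).mpr h)
      rw [if_neg hmem, List.length_append]
      by_cases hgap : s[m] - s[m-1]'(by omega) > 1
      · rw [if_pos hgap]; simp only [List.length_singleton]; push_cast; omega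
      · rw [if_neg hgap]; simp only [List.length_singleton]; push_cast; omega

-- ===== VERDICT (by name: the statement is the Claim_ definition above) =====
theorem max_possible_cost_spec : Claim_equal_max_possible_cost := by
  intro n a _ hpre
  unfold Spec_max_possible_cost max_possible_cost max_possible_cost_alt
  simp only []
  by_cases hn : n < 2
  · rw [if_pos hn, PySem.List.pyRange_one_eq_nil (by omega)]
    rfl
  · rw [if_neg hn]
    obtain ⟨m, rfl⟩ : ∃ m : Nat, n = (m : Int) := ⟨n.toNat, by omega⟩
    have hs : (PySem.List.sorted a (fun x => x) false).Pairwise (· ≤ ·) :=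
      PySem.List.sorted_pairwise a (fun x => x)
    have hlen : m ≤ (PySem.List.sorted a (fun x => x) false).length := by
      rw [PySem.List.length_sorted]
      rcases hpre with h | h
      · omega
      · exact_mod_cast h
    rw [PySem.List.slice_to_natCast, pv_snd_foldl]
    exact pv_loop_closed (PySem.List.sorted a (fun x => x) false) hs m
      (by omega) hlen
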